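-- pv_equiv track=rewrite | github.com/ndmikkelsen/btc-algo-trading | strategies/avellaneda_stoikov/mexc_client.py | _to_ccxt_symbol
-- ===== SOURCE A (Python) =====
-- def _to_ccxt_symbol(symbol: str) -> str:
--     """Convert 'BTCUSDT' to 'BTC/USDT'."""
--     if '/' in symbol:
--         return symbol
--     for quote in ['USDT', 'USDC', 'BTC', 'ETH']:
--         if symbol.endswith(quote) and len(symbol) > len(quote):
--             base = symbol[:-len(quote)]
--             return f"{base}/{quote}"
--     return symbol
-- ===== SOURCE B (Python) =====
-- _QUOTES = {'USDT', 'USDC', 'BTC', 'ETH'}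
--
--
-- def _to_ccxt_symbol(symbol: str) -> str:
--     """Convert 'BTCUSDT' to 'BTC/USDT'."""
--     if '/' in symbol:
--         return symbol
--     # scan split positions instead of candidate quotes: the first position whose
--     # suffix is a known quote gives the (unique) split; quotes are at most 4 chars,
--     # so only the last 4 positions are viable, and i >= 1 keeps the base non-empty
--     for i in range(max(1, len(symbol) - 4), len(symbol)):
--         if symbol[i:] in _QUOTES:
--             return symbol[:i] + '/' + symbol[i:]
--     return symbol
-- ===== Notes on version B (the rewrite author's own statement) =====
-- stated objective: alternative
-- what changed: Instead of looping over the four candidate quote currencies and testing each as a suffix, B scans the viable split positions of the symbol (the last four, since quotes have at most 4 chars) and returns at the first position whose suffix is in a set of known quotes; the non-empty-base check becomes starting the scan no earlier than position 1.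
import Mathlib
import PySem

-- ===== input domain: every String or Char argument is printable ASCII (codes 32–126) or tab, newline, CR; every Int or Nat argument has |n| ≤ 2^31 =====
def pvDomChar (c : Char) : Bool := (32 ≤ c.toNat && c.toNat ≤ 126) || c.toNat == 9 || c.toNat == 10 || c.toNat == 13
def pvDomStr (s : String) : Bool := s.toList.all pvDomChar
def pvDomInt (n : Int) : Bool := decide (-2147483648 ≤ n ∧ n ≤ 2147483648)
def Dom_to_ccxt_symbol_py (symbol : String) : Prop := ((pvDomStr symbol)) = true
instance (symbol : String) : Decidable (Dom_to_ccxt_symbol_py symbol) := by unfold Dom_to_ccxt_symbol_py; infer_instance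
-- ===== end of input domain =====

-- B scans split positions of the symbol (set lookup of the suffix) instead of A's loop
-- over candidate quote currencies; same return value everywhere (objective: alternative).

-- ===== PORT A =====
-- A's for-loop over the candidate quotes, first match wins
def pvALoop (symbol : String) : List String → String
  | [] => symbol
  | q :: rest =>
    if PySem.Str.endswith symbol q && decide (PySem.Str.len q < PySem.Str.len symbol) then
      PySem.Str.slice symbol none (some (-(PySem.Str.len q))) ++ "/" ++ q
    else pvALoop symbol rest

def to_ccxt_symbol_py (symbol : String) : String :=
  if PySem.Str.isIn "/" symbol then symbol
  else pvALoop symbol ["USDT", "USDC", "BTC", "ETH"]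

-- ===== PORT B =====
def pvQuotes : PySem.Set String := PySem.Set.ofList ["USDT", "USDC", "BTC", "ETH"]

-- B's for-loop over split positions i = 1 .. len(symbol)-1
def pvBLoop (symbol : String) : List Int → String
  | [] => symbol
  | i :: rest =>
    if PySem.Set.contains pvQuotes (PySem.Str.slice symbol (some i) none) then
      PySem.Str.slice symbol none (some i) ++ "/" ++ PySem.Str.slice symbol (some i) none
    else pvBLoop symbol rest

def to_ccxt_symbol_py_alt (symbol : String) : String :=
  if PySem.Str.isIn "/" symbol then symbol
  else pvBLoop symbol
    (PySem.List.pyRange (max 1 (PySem.Str.len symbol - 4)) (PySem.Str.len symbol))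

-- ===== PRECONDITION & SPEC =====
def Spec_to_ccxt_symbol_py (symbol : String) (out : String) : Prop := out = to_ccxt_symbol_py_alt symbol
instance (symbol : String) (out : String) : Decidable (Spec_to_ccxt_symbol_py symbol out) := by unfold Spec_to_ccxt_symbol_py; infer_instance

-- ===== CLAIM (what is proved, stated in full; the proofs are below) =====
def Claim_equal_to_ccxt_symbol_py : Prop := ∀ (symbol : String), Dom_to_ccxt_symbol_py symbol → Spec_to_ccxt_symbol_py symbol (to_ccxt_symbol_py symbol)

-- ===== LEMMAS AND PROOFS =====

theorem pvOfList_eq_iff (l : List Char) (q : String) : String.ofList l = q ↔ l = q.toList := by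
  constructor
  · intro h; rw [← h]; simp
  · intro h; rw [h]; simp

theorem pvQuotes_eq : pvQuotes = ["USDT", "USDC", "BTC", "ETH"] := by decide

-- B's suffix test, characterised on the char list (j : Nat is the split position)
theorem pvHit_iff (symbol : String) (j : Nat) :
    PySem.Set.contains pvQuotes (PySem.Str.slice symbol (some (j : Int)) none) = true ↔
      (symbol.toList.drop j = "USDT".toList ∨ symbol.toList.drop j = "USDC".toList ∨
       symbol.toList.drop j = "BTC".toList ∨ symbol.toList.drop j = "ETH".toList) := by
  have hs : PySem.Str.slice symbol (some (j : Int)) none = String.ofList (symbol.toList.drop j) := by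
    simp [PySem.Str.slice, PySem.Chars.slice_eq_listSlice, PySem.List.slice_from_natCast]
  rw [PySem.Set.contains_iff, pvQuotes_eq, hs]
  simp [pvOfList_eq_iff]

-- A's per-quote condition, characterised on the char list
theorem pvCond_iff (symbol q : String) :
    (PySem.Str.endswith symbol q && decide (PySem.Str.len q < PySem.Str.len symbol)) = true ↔
      (q.toList.length < symbol.toList.length ∧
       symbol.toList.drop (symbol.toList.length - q.toList.length) = q.toList) := by
  rw [Bool.and_eq_true, PySem.Str.endswith_eq, decide_eq_true_iff]
  rw [PySem.Chars.endswith_iff, List.suffix_iff_eq_drop, PySem.Str.len_eq, PySem.Str.len_eq]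
  constructor
  · rintro ⟨h1, h2⟩; exact ⟨by exact_mod_cast h2, h1.symm⟩
  · rintro ⟨h1, h2⟩; exact ⟨h2.symm, by exact_mod_cast h1⟩

-- a run of misses is skipped
theorem pvBLoop_skip (symbol : String) (is₁ is₂ : List Int)
    (h : ∀ i ∈ is₁, PySem.Set.contains pvQuotes (PySem.Str.slice symbol (some i) none) = false) :
    pvBLoop symbol (is₁ ++ is₂) = pvBLoop symbol is₂ := by
  induction is₁ with
  | nil => rfl
  | cons i t ih =>
    simp only [List.cons_append, pvBLoop, h i (List.mem_cons_self ..), Bool.false_eq_true,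
      if_false]
    exact ih fun j hj => h j (List.mem_cons_of_mem _ hj)

theorem pvBLoop_all_miss (symbol : String) (is : List Int)
    (h : ∀ i ∈ is, PySem.Set.contains pvQuotes (PySem.Str.slice symbol (some i) none) = false) :
    pvBLoop symbol is = symbol := by
  have := pvBLoop_skip symbol is [] h
  simpa using this

-- if the split position k carries a quote and everything before it misses,
-- B's range loop returns take k / drop k
theorem pvBLoop_range_hit (symbol : String) (k : Nat)
    (hk1 : 1 ≤ k) (hkn : k < symbol.toList.length) (hk4 : symbol.toList.length ≤ k + 4)
    (hhit : PySem.Set.contains pvQuotes (PySem.Str.slice symbol (some (k : Int)) none) = true)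
    (hmiss : ∀ j : Nat, 1 ≤ j → j < k →
      PySem.Set.contains pvQuotes (PySem.Str.slice symbol (some (j : Int)) none) = false) :
    pvBLoop symbol (PySem.List.pyRange (max 1 ((symbol.toList.length : Int) - 4))
        (symbol.toList.length : Int)) =
      String.ofList (symbol.toList.take k) ++ "/" ++ String.ofList (symbol.toList.drop k) := by
  have hsplit := PySem.List.pyRange_one_append (max 1 ((symbol.toList.length : Int) - 4))
    (k : Int) (symbol.toList.length : Int) (by omega) (by exact_mod_cast hkn.le)
  rw [hsplit, pvBLoop_skip symbol _ _ (by
    intro i hi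
    rw [PySem.List.mem_pyRange_one] at hi
    obtain ⟨h1, h2⟩ := hi
    have hi' : i = ((i.toNat : Nat) : Int) := by omega
    rw [hi']
    exact hmiss i.toNat (by omega) (by omega))]
  rw [PySem.List.pyRange_one_cons (by exact_mod_cast hkn)]
  simp only [pvBLoop, hhit, if_true]
  have h1 : PySem.Str.slice symbol none (some (k : Int)) = String.ofList (symbol.toList.take k) := by
    simp [PySem.Str.slice, PySem.Chars.slice_eq_listSlice, PySem.List.slice_to_natCast]
  have h2 : PySem.Str.slice symbol (some (k : Int)) none = String.ofList (symbol.toList.drop k) := by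
    simp [PySem.Str.slice, PySem.Chars.slice_eq_listSlice, PySem.List.slice_from_natCast]
  rw [h1, h2]

-- a split position whose suffix is longer than 4 or shorter than 3 always misses
theorem pvMiss_of_len (symbol : String) (j : Nat)
    (h : symbol.toList.length - j ≠ 3 ∧ symbol.toList.length - j ≠ 4) :
    PySem.Set.contains pvQuotes (PySem.Str.slice symbol (some (j : Int)) none) = false := by
  rw [Bool.eq_false_iff, Ne, pvHit_iff]
  intro hcase
  have hlen : (symbol.toList.drop j).length = symbol.toList.length - j := List.length_drop ..
  rcases hcase with h1 | h1 | h1 | h1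
  · rw [h1, show ("USDT".toList).length = 4 from by decide] at hlen; omega
  · rw [h1, show ("USDC".toList).length = 4 from by decide] at hlen; omega
  · rw [h1, show ("BTC".toList).length = 3 from by decide] at hlen; omega
  · rw [h1, show ("ETH".toList).length = 3 from by decide] at hlen; omega

-- the two loops agree
theorem pvLoops_eq (symbol : String) :
    pvALoop symbol ["USDT", "USDC", "BTC", "ETH"] =
      pvBLoop symbol
        (PySem.List.pyRange (max 1 (PySem.Str.len symbol - 4)) (PySem.Str.len symbol)) := by
  rw [PySem.Str.len_eq]
  -- a generic treatment of one matched quote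
  have main : ∀ (q : String) (k : Nat), q.toList.length + k = symbol.toList.length →
      (q = "USDT" ∨ q = "USDC" ∨ q = "BTC" ∨ q = "ETH") →
      1 ≤ k →
      symbol.toList.drop k = q.toList →
      (∀ j : Nat, 1 ≤ j → j < k →
        PySem.Set.contains pvQuotes (PySem.Str.slice symbol (some (j : Int)) none) = false) →
      PySem.Str.slice symbol none (some (-(PySem.Str.len q))) ++ "/" ++ q =
        pvBLoop symbol (PySem.List.pyRange (max 1 ((symbol.toList.length : Int) - 4))
          (symbol.toList.length : Int)) := by
    intro q k hqk hq hk1 hdrop hmiss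
    have hql4 : q.toList.length ≤ 4 := by rcases hq with h|h|h|h <;> subst h <;> decide
    have hk4 : symbol.toList.length ≤ k + 4 := by omega
    have hql : 0 < q.toList.length := by rcases hq with h|h|h|h <;> subst h <;> decide
    have hkn : k < symbol.toList.length := by omega
    have hhit : PySem.Set.contains pvQuotes
        (PySem.Str.slice symbol (some ((k : Nat) : Int)) none) = true := by
      rw [pvHit_iff, hdrop]
      rcases hq with h|h|h|h <;> subst h <;> simp
    rw [pvBLoop_range_hit symbol k hk1 hkn hk4 hhit hmiss]
    have hbase : PySem.Str.slice symbol none (some (-(PySem.Str.len q))) =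
        String.ofList (symbol.toList.take k) := by
      rcases hq with h|h|h|h <;> subst h
      · rw [show PySem.Str.len "USDT" = (4 : Int) from by decide]
        simp only [PySem.Str.slice, PySem.Chars.slice_eq_listSlice]
        rw [PySem.List.slice_to_neg_ofNat symbol.toList 4 (by norm_num),
          show symbol.toList.length - 4 = k from by
            have : ("USDT".toList).length = 4 := (by decide); omega]
      · rw [show PySem.Str.len "USDC" = (4 : Int) from by decide]
        simp only [PySem.Str.slice, PySem.Chars.slice_eq_listSlice]
        rw [PySem.List.slice_to_neg_ofNat symbol.toList 4 (by norm_num),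
          show symbol.toList.length - 4 = k from by
            have : ("USDC".toList).length = 4 := (by decide); omega]
      · rw [show PySem.Str.len "BTC" = (3 : Int) from by decide]
        simp only [PySem.Str.slice, PySem.Chars.slice_eq_listSlice]
        rw [PySem.List.slice_to_neg_ofNat symbol.toList 3 (by norm_num),
          show symbol.toList.length - 3 = k from by
            have : ("BTC".toList).length = 3 := (by decide); omega]
      · rw [show PySem.Str.len "ETH" = (3 : Int) from by decide]
        simp only [PySem.Str.slice, PySem.Chars.slice_eq_listSlice]
        rw [PySem.List.slice_to_neg_ofNat symbol.toList 3 (by norm_num),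
          show symbol.toList.length - 3 = k from by
            have : ("ETH".toList).length = 3 := (by decide); omega]
    rw [hbase, show String.ofList (symbol.toList.drop k) = q from
      (pvOfList_eq_iff _ _).mpr hdrop]
  -- helper to read A's condition as "the suffix at position n - |q| is q"
  have condk : ∀ (q : String) (l : Nat), q.toList.length = l →
      ((PySem.Str.endswith symbol q &&
        decide (PySem.Str.len q < PySem.Str.len symbol)) = true ↔
       (l < symbol.toList.length ∧ symbol.toList.drop (symbol.toList.length - l) = q.toList)) := by
    intro q l hl
    rw [pvCond_iff, hl]
  by_cases hU : (PySem.Str.endswith symbol "USDT" &&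
      decide (PySem.Str.len "USDT" < PySem.Str.len symbol)) = true
  · rw [pvALoop, if_pos hU]
    rw [condk "USDT" 4 (by decide)] at hU
    have hU1 := hU.1
    refine main "USDT" (symbol.toList.length - 4)
      (by have : ("USDT".toList).length = 4 := (by decide); omega) (Or.inl rfl)
      (by omega) hU.2 fun j h1 h2 => pvMiss_of_len symbol j (by omega)
  · rw [pvALoop, if_neg hU]
    by_cases hC : (PySem.Str.endswith symbol "USDC" &&
        decide (PySem.Str.len "USDC" < PySem.Str.len symbol)) = true
    · rw [pvALoop, if_pos hC]
      rw [condk "USDC" 4 (by decide)] at hC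
      have hC1 := hC.1
      refine main "USDC" (symbol.toList.length - 4)
        (by have : ("USDC".toList).length = 4 := (by decide); omega) (Or.inr (Or.inl rfl))
        (by omega) hC.2 fun j h1 h2 => pvMiss_of_len symbol j (by omega)
    · rw [pvALoop, if_neg hC]
      rw [condk "USDT" 4 (by decide)] at hU
      rw [condk "USDC" 4 (by decide)] at hC
      -- after ¬hU, ¬hC a split position whose suffix has length 4 always misses
      have hmiss4 : ∀ j : Nat, 1 ≤ j → symbol.toList.length - j = 4 →
          PySem.Set.contains pvQuotes (PySem.Str.slice symbol (some (j : Int)) none) = false := by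
        intro j hj1 hj4
        rw [Bool.eq_false_iff, Ne, pvHit_iff]
        intro hcase
        have hlen : (symbol.toList.drop j).length = symbol.toList.length - j :=
          List.length_drop ..
        rcases hcase with h1 | h1 | h1 | h1
        · exact hU ⟨by omega, by rw [show symbol.toList.length - 4 = j from by omega]; exact h1⟩
        · exact hC ⟨by omega, by rw [show symbol.toList.length - 4 = j from by omega]; exact h1⟩
        · rw [h1, show ("BTC".toList).length = 3 from by decide] at hlen; omega
        · rw [h1, show ("ETH".toList).length = 3 from by decide] at hlen; omega
      by_cases hB : (PySem.Str.endswith symbol "BTC" &&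
          decide (PySem.Str.len "BTC" < PySem.Str.len symbol)) = true
      · rw [pvALoop, if_pos hB]
        rw [condk "BTC" 3 (by decide)] at hB
        have hB1 := hB.1
        refine main "BTC" (symbol.toList.length - 3)
          (by have : ("BTC".toList).length = 3 := (by decide); omega)
          (Or.inr (Or.inr (Or.inl rfl))) (by omega) hB.2 fun j h1 h2 => ?_
        by_cases h4 : symbol.toList.length - j = 4
        · exact hmiss4 j h1 h4
        · exact pvMiss_of_len symbol j (by omega)
      · rw [pvALoop, if_neg hB]
        by_cases hE : (PySem.Str.endswith symbol "ETH" &&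
            decide (PySem.Str.len "ETH" < PySem.Str.len symbol)) = true
        · rw [pvALoop, if_pos hE]
          rw [condk "ETH" 3 (by decide)] at hE
          have hE1 := hE.1
          refine main "ETH" (symbol.toList.length - 3)
            (by have : ("ETH".toList).length = 3 := (by decide); omega)
            (Or.inr (Or.inr (Or.inr rfl))) (by omega) hE.2 fun j h1 h2 => ?_
          by_cases h4 : symbol.toList.length - j = 4
          · exact hmiss4 j h1 h4
          · exact pvMiss_of_len symbol j (by omega)
        · rw [pvALoop, if_neg hE]
          rw [condk "BTC" 3 (by decide)] at hB
          rw [condk "ETH" 3 (by decide)] at hE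
          -- no quote matches: a length-3 suffix misses too
          have hmiss3 : ∀ j : Nat, 1 ≤ j → symbol.toList.length - j = 3 →
              PySem.Set.contains pvQuotes (PySem.Str.slice symbol (some (j : Int)) none) = false := by
            intro j hj1 hj3
            rw [Bool.eq_false_iff, Ne, pvHit_iff]
            intro hcase
            have hlen : (symbol.toList.drop j).length = symbol.toList.length - j :=
              List.length_drop ..
            rcases hcase with h1 | h1 | h1 | h1
            · rw [h1, show ("USDT".toList).length = 4 from by decide] at hlen; omega
            · rw [h1, show ("USDC".toList).length = 4 from by decide] at hlen; omega
            · exact hB ⟨by omega,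
                by rw [show symbol.toList.length - 3 = j from by omega]; exact h1⟩
            · exact hE ⟨by omega,
                by rw [show symbol.toList.length - 3 = j from by omega]; exact h1⟩
          rw [pvALoop, pvBLoop_all_miss symbol _ ?_]
          intro i hi
          rw [PySem.List.mem_pyRange_one] at hi
          obtain ⟨h1, h2⟩ := hi
          rw [show i = ((i.toNat : Nat) : Int) from by omega]
          by_cases h4 : symbol.toList.length - i.toNat = 4
          · exact hmiss4 i.toNat (by omega) h4
          · by_cases h3 : symbol.toList.length - i.toNat = 3
            · exact hmiss3 i.toNat (by omega) h3
            · exact pvMiss_of_len symbol i.toNat ⟨h3, h4⟩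

-- ===== VERDICT (by name: the statement is the Claim_ definition above) =====
theorem to_ccxt_symbol_py_spec : Claim_equal_to_ccxt_symbol_py := by
  intro symbol _
  unfold Spec_to_ccxt_symbol_py to_ccxt_symbol_py to_ccxt_symbol_py_alt
  by_cases h : PySem.Str.isIn "/" symbol = true
  · rw [if_pos h, if_pos h]
  · rw [if_neg h, if_neg h]
    exact pvLoops_eq symbol
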